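-- pv_equiv track=rewrite | github.com/SuperSamilam/AreUPredictable | Python/PatternFinder.py | aritmeticPredictor
-- ===== SOURCE A (Python) =====
-- def aritmeticPredictor(input, maxStrenght):
--     differences = {
--         1:0,
--         2:0,
--         3:0,
--         4:0,
--         -1:0,
--         -2:0,
--         -3:0,
--         -4:0
--     }
--
--     if (len(input) >= maxStrenght):
--         for d in differences:
--             for i in range(len(input) - 1, len(input) - maxStrenght, -1):
--                 newValue = input[i] - d
--                 if (newValue == 0): newValue = 9
--                 if (newValue == 10): newValue = 1
--
--                 if (newValue == input[i-1]):
--                     differences[d] += 1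
--                 else:
--                     break
--
--     key = max(differences, key=differences.get)
--     value = differences[key]
--     return key, value
-- ===== SOURCE B (Python) =====
-- def aritmeticPredictor(input, maxStrenght):
--     n = len(input)
--     if n < maxStrenght or maxStrenght < 2:
--         return (1, 0)
--     last, prev = input[-1], input[-2]
--     d0 = None
--     for d in (1, 2, 3, 4, -1, -2, -3, -4):
--         v = last - d
--         if v == 0: v = 9
--         if v == 10: v = 1
--         if v == prev:
--             d0 = d
--             break
--     if d0 is None:
--         return (1, 0)
--     count = 0
--     for i in range(n - 1, n - maxStrenght, -1):
--         v = input[i] - d0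
--         if v == 0: v = 9
--         if v == 10: v = 1
--         if v != input[i - 1]:
--             break
--         count += 1
--     return (d0, count)
-- ===== Notes on version B (the rewrite author's own statement) =====
-- stated objective: simpler
-- what changed: A runs eight full backward scans (one per candidate difference) into a dict and then takes the insertion-order argmax; B reads the unique matching difference off the last pair (the partial wrap maps at most one candidate onto it) and does a single backward counting scan, returning (1, 0) when no candidate matches or the guard fails.
import Mathlib
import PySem

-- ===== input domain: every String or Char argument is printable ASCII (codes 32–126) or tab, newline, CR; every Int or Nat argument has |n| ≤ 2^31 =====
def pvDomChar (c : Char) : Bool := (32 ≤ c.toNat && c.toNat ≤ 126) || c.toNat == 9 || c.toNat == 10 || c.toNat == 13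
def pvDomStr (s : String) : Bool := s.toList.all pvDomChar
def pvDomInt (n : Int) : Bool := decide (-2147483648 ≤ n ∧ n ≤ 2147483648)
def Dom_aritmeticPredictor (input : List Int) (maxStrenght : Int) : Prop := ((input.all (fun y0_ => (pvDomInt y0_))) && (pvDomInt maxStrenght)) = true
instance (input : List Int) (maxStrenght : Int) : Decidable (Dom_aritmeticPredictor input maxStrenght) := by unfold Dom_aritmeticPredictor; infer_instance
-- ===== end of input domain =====

-- B replaces A's eight full tail scans + dict argmax by one scan: the unique difference is read off the last pair, then counted backward (objective: simpler).

-- ===== PORT A =====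
-- inner 'for i in range(len-1, len-maxStrenght, -1)' with its break: structural recursion over the range list;
-- input[i] via pyGetD (whenever the loop runs, 1 ≤ i < len input, so the default is never read and Python never raises).
def apScan (input : List Int) (d : Int) (dct : PySem.Dict Int Int) : List Int → PySem.Dict Int Int
  | [] => dct
  | i :: rest =>
    let newValue := PySem.List.pyGetD input i 0 - d
    let newValue := if newValue = 0 then 9 else newValue
    let newValue := if newValue = 10 then 1 else newValue
    if newValue = PySem.List.pyGetD input (i - 1) 0 then
      apScan input d (dct.modify d 0 (· + 1)) rest
    else dct

def aritmeticPredictor (input : List Int) (maxStrenght : Int) : Int × Int :=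
  let differences : PySem.Dict Int Int :=
    PySem.Dict.ofList [(1,0),(2,0),(3,0),(4,0),(-1,0),(-2,0),(-3,0),(-4,0)]
  let differences :=
    if (input.length : Int) ≥ maxStrenght then
      differences.keys.foldl
        (fun dct d => apScan input d dct
          (PySem.List.pyRange ((input.length : Int) - 1) ((input.length : Int) - maxStrenght) (-1)))
        differences
    else differences
  -- max(differences, key=differences.get): the dict always holds exactly 8 keys, so getD's default 1 is never read
  let key := (PySem.List.max? differences.keys (fun k => differences.getD k 0)).getD 1
  (key, differences.getD key 0)

-- ===== PORT B =====
def apWrapB (x : Int) : Int := if x = 0 then 9 else if x = 10 then 1 else x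

def bCount (input : List Int) (d : Int) : List Int → Int
  | [] => 0
  | i :: rest =>
    if apWrapB (PySem.List.pyGetD input i 0 - d) ≠ PySem.List.pyGetD input (i - 1) 0 then 0
    else 1 + bCount input d rest

def aritmeticPredictor_alt (input : List Int) (maxStrenght : Int) : Int × Int :=
  let n : Int := input.length
  if n < maxStrenght ∨ maxStrenght < 2 then (1, 0)
  else
    let last := PySem.List.pyGetD input (-1) 0
    let prev := PySem.List.pyGetD input (-2) 0
    match ([1, 2, 3, 4, -1, -2, -3, -4] : List Int).find? (fun d => apWrapB (last - d) == prev) with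
    | none => (1, 0)
    | some d0 => (d0, bCount input d0 (PySem.List.pyRange (n - 1) (n - maxStrenght) (-1)))

-- ===== PRECONDITION & SPEC =====
def Spec_aritmeticPredictor (input : List Int) (maxStrenght : Int) (out : Int × Int) : Prop := out = aritmeticPredictor_alt input maxStrenght
instance (input : List Int) (maxStrenght : Int) (out : Int × Int) : Decidable (Spec_aritmeticPredictor input maxStrenght out) := by unfold Spec_aritmeticPredictor; infer_instance

-- ===== CLAIM (what is proved, stated in full; the proofs are below) =====
def Claim_equal_aritmeticPredictor : Prop := ∀ (input : List Int) (maxStrenght : Int), Dom_aritmeticPredictor input maxStrenght → Spec_aritmeticPredictor input maxStrenght (aritmeticPredictor input maxStrenght)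

-- ===== LEMMAS AND PROOFS =====

-- A's inlined wrap (0→9 then 10→1) equals B's helper
lemma wrap_eq (v : Int) :
    (if (if v = 0 then 9 else v) = 10 then 1 else (if v = 0 then 9 else v)) = apWrapB v := by
  unfold apWrapB; split_ifs <;> omega

lemma apWrapB_inj {x y : Int} (h1 : x - y ≤ 8) (h2 : y - x ≤ 8) (h : apWrapB x = apWrapB y) : x = y := by
  unfold apWrapB at h; split_ifs at h <;> omega

lemma bCount_nonneg (input : List Int) (d : Int) (R : List Int) : 0 ≤ bCount input d R := by
  induction R with
  | nil => simp [bCount]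
  | cons i rest ih => unfold bCount; split_ifs <;> omega

lemma apScan_keys (input : List Int) (d : Int) (dct : PySem.Dict Int Int) (R : List Int)
    (h : dct.contains d = true) :
    (apScan input d dct R).keys = dct.keys := by
  induction R generalizing dct with
  | nil => rfl
  | cons i rest ih =>
    simp only [apScan]
    rw [wrap_eq]
    by_cases hc : apWrapB (PySem.List.pyGetD input i 0 - d) = PySem.List.pyGetD input (i - 1) 0
    · rw [if_pos hc, ih _ (by rw [PySem.Dict.contains_modify]; simp),
        PySem.Dict.keys_modify, PySem.Dict.keys_insert_of_contains _ _ h]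
    · rw [if_neg hc]

lemma apScan_getD (input : List Int) (d : Int) (dct : PySem.Dict Int Int) (R : List Int) (k : Int) :
    (apScan input d dct R).getD k 0 = dct.getD k 0 + (if k = d then bCount input d R else 0) := by
  induction R generalizing dct with
  | nil => simp [apScan, bCount]
  | cons i rest ih =>
    simp only [apScan, bCount]
    rw [wrap_eq]
    by_cases h : apWrapB (PySem.List.pyGetD input i 0 - d) = PySem.List.pyGetD input (i - 1) 0
    · rw [if_pos h, if_neg (not_not_intro h), ih, PySem.Dict.getD_modify]
      by_cases hk : k = d
      · subst hk
        rw [if_pos rfl, if_pos rfl]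
        generalize bCount input k rest = c
        omega
      · simp [hk]
    · rw [if_neg h, if_pos h]
      simp


lemma apScan_contains (input : List Int) (d : Int) (dct : PySem.Dict Int Int) (R : List Int)
    (h : dct.contains d = true) (k : Int) :
    (apScan input d dct R).contains k = dct.contains k := by
  induction R generalizing dct with
  | nil => rfl
  | cons i rest ih =>
    simp only [apScan]
    rw [wrap_eq]
    by_cases hc : apWrapB (PySem.List.pyGetD input i 0 - d) = PySem.List.pyGetD input (i - 1) 0
    · rw [if_pos hc, ih _ (by rw [PySem.Dict.contains_modify]; simp), PySem.Dict.contains_modify]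
      by_cases hk : k = d
      · subst hk; simp [h]
      · simp [show (k == d) = false by simp [hk]]
    · rw [if_neg hc]

lemma foldScan_keys (input : List Int) (R : List Int) :
    ∀ (ds : List Int) (dct : PySem.Dict Int Int), (∀ d ∈ ds, dct.contains d = true) →
      (ds.foldl (fun dct d => apScan input d dct R) dct).keys = dct.keys := by
  intro ds
  induction ds with
  | nil => intro dct _; rfl
  | cons a t ih =>
    intro dct h
    simp only [List.foldl]
    rw [ih _ ?_, apScan_keys _ _ _ _ (h a (by simp))]
    intro d hd
    rw [apScan_contains _ _ _ _ (h a (by simp))]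
    exact h d (by simp [hd])

lemma dct0_getD (k : Int) :
    (PySem.Dict.ofList [((1:Int),(0:Int)),((2:Int),(0:Int)),((3:Int),(0:Int)),((4:Int),(0:Int)),((-1:Int),(0:Int)),((-2:Int),(0:Int)),((-3:Int),(0:Int)),((-4:Int),(0:Int))]).getD k 0 = 0 := by
  rw [show (PySem.Dict.ofList [((1:Int),(0:Int)),((2:Int),(0:Int)),((3:Int),(0:Int)),((4:Int),(0:Int)),((-1:Int),(0:Int)),((-2:Int),(0:Int)),((-3:Int),(0:Int)),((-4:Int),(0:Int))]) = PySem.Dict.mk [((1:Int),(0:Int)),((2:Int),(0:Int)),((3:Int),(0:Int)),((4:Int),(0:Int)),((-1:Int),(0:Int)),((-2:Int),(0:Int)),((-3:Int),(0:Int)),((-4:Int),(0:Int))] from rfl]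
  simp only [PySem.Dict.getD_eq_get?_getD, PySem.Dict.get?_mk_cons]
  split_ifs <;> rfl

lemma maxsel_zero (c : Int → Int) (h1 : c 1 = 0) (h2 : c 2 = 0) (h3 : c 3 = 0) (h4 : c 4 = 0)
    (h5 : c (-1) = 0) (h6 : c (-2) = 0) (h7 : c (-3) = 0) (h8 : c (-4) = 0) :
    PySem.List.max? ([1, 2, 3, 4, -1, -2, -3, -4] : List Int) c = some 1 := by
  simp [PySem.List.max?, List.foldl, h1, h2, h3, h4, h5, h6, h7, h8]

lemma maxsel_pos (c : Int → Int) (d0 : Int) (hmem : d0 ∈ ([1, 2, 3, 4, -1, -2, -3, -4] : List Int)) (hpos : 1 ≤ c d0)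
    (hz : ∀ d ∈ ([1, 2, 3, 4, -1, -2, -3, -4] : List Int), d ≠ d0 → c d = 0) :
    PySem.List.max? ([1, 2, 3, 4, -1, -2, -3, -4] : List Int) c = some d0 := by
  obtain ⟨w, hw⟩ : ∃ w, PySem.List.max? ([1, 2, 3, 4, -1, -2, -3, -4] : List Int) c = some w := by
    cases h : PySem.List.max? ([1, 2, 3, 4, -1, -2, -3, -4] : List Int) c with
    | none => exact absurd ((PySem.List.max?_eq_none_iff _ _).mp h) (by simp)
    | some w => exact ⟨w, rfl⟩
  have hmem' := PySem.List.max?_mem hw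
  have hle := PySem.List.max?_isMax hw d0 hmem
  have hwd : w = d0 := by
    by_contra hne
    have := hz w hmem' hne
    omega
  rw [hw, hwd]

-- ===== VERDICT (by name: the statement is the Claim_ definition above) =====
theorem aritmeticPredictor_spec : Claim_equal_aritmeticPredictor := by
  intro input m _
  unfold Spec_aritmeticPredictor
  by_cases hge : (input.length : Int) ≥ m
  · by_cases hm : m < 2
    · simp only [aritmeticPredictor, aritmeticPredictor_alt]
      rw [if_pos hge, if_pos (Or.inr hm), PySem.List.pyRange_neg_one_eq_nil (by omega)]
      simp only [apScan]
      rfl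
    · -- main case: maxStrenght ≥ 2 and len input ≥ maxStrenght
      have h2L : 2 ≤ input.length := by omega
      simp only [aritmeticPredictor, aritmeticPredictor_alt]
      rw [if_pos hge, if_neg (by omega : ¬((input.length : Int) < m ∨ m < 2))]
      have hlast : PySem.List.pyGetD input (-1) 0 = PySem.List.pyGetD input ((input.length : Int) - 1) 0 := by
        rw [PySem.List.pyGetD_neg_ofNat input 1 0 (by omega) (by omega)]
        conv_rhs => rw [PySem.List.pyGetD_eq_getElem input 0 (by omega) (by omega)]
        simp only [show ((input.length : Int) - 1).toNat = input.length - 1 from by omega]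
      have hprev : PySem.List.pyGetD input (-2) 0 = PySem.List.pyGetD input ((input.length : Int) - 1 - 1) 0 := by
        rw [PySem.List.pyGetD_neg_ofNat input 2 0 (by omega) (by omega)]
        conv_rhs => rw [PySem.List.pyGetD_eq_getElem input 0 (by omega) (by omega)]
        simp only [show ((input.length : Int) - 1 - 1).toNat = input.length - 2 from by omega]
      have hk0 : (PySem.Dict.ofList [((1:Int),(0:Int)),((2:Int),(0:Int)),((3:Int),(0:Int)),((4:Int),(0:Int)),((-1:Int),(0:Int)),((-2:Int),(0:Int)),((-3:Int),(0:Int)),((-4:Int),(0:Int))]).keys = ([1, 2, 3, 4, -1, -2, -3, -4] : List Int) := rfl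
      rw [hk0, hlast, hprev]
      set DF := (([1, 2, 3, 4, -1, -2, -3, -4] : List Int).foldl (fun dct d => apScan input d dct (PySem.List.pyRange ((input.length : Int) - 1) ((input.length : Int) - m) (-1))) (PySem.Dict.ofList [((1:Int),(0:Int)),((2:Int),(0:Int)),((3:Int),(0:Int)),((4:Int),(0:Int)),((-1:Int),(0:Int)),((-2:Int),(0:Int)),((-3:Int),(0:Int)),((-4:Int),(0:Int))])) with hDF
      have hbc : ∀ d : Int, bCount input d (PySem.List.pyRange ((input.length : Int) - 1) ((input.length : Int) - m) (-1)) = if apWrapB (PySem.List.pyGetD input ((input.length : Int) - 1) 0 - d) = PySem.List.pyGetD input ((input.length : Int) - 1 - 1) 0 then 1 + bCount input d (PySem.List.pyRange ((input.length : Int) - 1 - 1) ((input.length : Int) - m) (-1)) else 0 := by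
        intro d
        rw [PySem.List.pyRange_neg_one_cons (by omega)]
        simp only [bCount]
        by_cases hw : apWrapB (PySem.List.pyGetD input ((input.length : Int) - 1) 0 - d) = PySem.List.pyGetD input ((input.length : Int) - 1 - 1) 0
        · simp [hw]
        · simp [hw]
      have hkeys : DF.keys = ([1, 2, 3, 4, -1, -2, -3, -4] : List Int) := by
        rw [hDF, foldScan_keys _ _ _ _ (by decide), hk0]
      have hval : ∀ d ∈ ([1, 2, 3, 4, -1, -2, -3, -4] : List Int), DF.getD d 0 = bCount input d (PySem.List.pyRange ((input.length : Int) - 1) ((input.length : Int) - m) (-1)) := by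
        intro d hd
        rw [hDF]
        simp only [List.foldl]
        rw [apScan_getD, apScan_getD, apScan_getD, apScan_getD, apScan_getD, apScan_getD, apScan_getD, apScan_getD, dct0_getD]
        fin_cases hd <;> norm_num
      rw [hkeys]
      by_cases b1 : apWrapB (PySem.List.pyGetD input ((input.length : Int) - 1) 0 - (1 : Int)) = PySem.List.pyGetD input ((input.length : Int) - 1 - 1) 0
      · have hfind : (([1, 2, 3, 4, -1, -2, -3, -4] : List Int).find? (fun d => apWrapB (PySem.List.pyGetD input ((input.length : Int) - 1) 0 - d) == PySem.List.pyGetD input ((input.length : Int) - 1 - 1) 0)) = some (1 : Int) := by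
          rw [List.find?_cons_of_pos (by simp only [beq_iff_eq]; exact b1)]
        rw [hfind]
        have hpos : 1 ≤ DF.getD (1 : Int) 0 := by
          rw [hval (1 : Int) (by norm_num), hbc, if_pos b1]
          have := bCount_nonneg input (1 : Int) (PySem.List.pyRange ((input.length : Int) - 1 - 1) ((input.length : Int) - m) (-1))
          omega
        have hz : ∀ d ∈ ([1, 2, 3, 4, -1, -2, -3, -4] : List Int), d ≠ (1 : Int) → DF.getD d 0 = 0 := by
          intro d hd hne
          have hbnd : -4 ≤ d ∧ d ≤ 4 := by fin_cases hd <;> norm_num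
          have hww : ¬ (apWrapB (PySem.List.pyGetD input ((input.length : Int) - 1) 0 - d) = PySem.List.pyGetD input ((input.length : Int) - 1 - 1) 0) := by
            intro hw
            have h9 := apWrapB_inj (x := PySem.List.pyGetD input ((input.length : Int) - 1) 0 - d) (y := PySem.List.pyGetD input ((input.length : Int) - 1) 0 - (1 : Int)) (by omega) (by omega) (hw.trans b1.symm)
            omega
          rw [hval d hd, hbc, if_neg hww]
        rw [maxsel_pos _ (1 : Int) (by norm_num) hpos hz, Option.getD_some, hval (1 : Int) (by norm_num)]
      · by_cases b2 : apWrapB (PySem.List.pyGetD input ((input.length : Int) - 1) 0 - (2 : Int)) = PySem.List.pyGetD input ((input.length : Int) - 1 - 1) 0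
        · have hfind : (([1, 2, 3, 4, -1, -2, -3, -4] : List Int).find? (fun d => apWrapB (PySem.List.pyGetD input ((input.length : Int) - 1) 0 - d) == PySem.List.pyGetD input ((input.length : Int) - 1 - 1) 0)) = some (2 : Int) := by
            rw [List.find?_cons_of_neg (by simp only [beq_iff_eq]; exact b1)]
            rw [List.find?_cons_of_pos (by simp only [beq_iff_eq]; exact b2)]
          rw [hfind]
          have hpos : 1 ≤ DF.getD (2 : Int) 0 := by
            rw [hval (2 : Int) (by norm_num), hbc, if_pos b2]
            have := bCount_nonneg input (2 : Int) (PySem.List.pyRange ((input.length : Int) - 1 - 1) ((input.length : Int) - m) (-1))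
            omega
          have hz : ∀ d ∈ ([1, 2, 3, 4, -1, -2, -3, -4] : List Int), d ≠ (2 : Int) → DF.getD d 0 = 0 := by
            intro d hd hne
            have hbnd : -4 ≤ d ∧ d ≤ 4 := by fin_cases hd <;> norm_num
            have hww : ¬ (apWrapB (PySem.List.pyGetD input ((input.length : Int) - 1) 0 - d) = PySem.List.pyGetD input ((input.length : Int) - 1 - 1) 0) := by
              intro hw
              have h9 := apWrapB_inj (x := PySem.List.pyGetD input ((input.length : Int) - 1) 0 - d) (y := PySem.List.pyGetD input ((input.length : Int) - 1) 0 - (2 : Int)) (by omega) (by omega) (hw.trans b2.symm)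
              omega
            rw [hval d hd, hbc, if_neg hww]
          rw [maxsel_pos _ (2 : Int) (by norm_num) hpos hz, Option.getD_some, hval (2 : Int) (by norm_num)]
        · by_cases b3 : apWrapB (PySem.List.pyGetD input ((input.length : Int) - 1) 0 - (3 : Int)) = PySem.List.pyGetD input ((input.length : Int) - 1 - 1) 0
          · have hfind : (([1, 2, 3, 4, -1, -2, -3, -4] : List Int).find? (fun d => apWrapB (PySem.List.pyGetD input ((input.length : Int) - 1) 0 - d) == PySem.List.pyGetD input ((input.length : Int) - 1 - 1) 0)) = some (3 : Int) := by
              rw [List.find?_cons_of_neg (by simp only [beq_iff_eq]; exact b1)]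
              rw [List.find?_cons_of_neg (by simp only [beq_iff_eq]; exact b2)]
              rw [List.find?_cons_of_pos (by simp only [beq_iff_eq]; exact b3)]
            rw [hfind]
            have hpos : 1 ≤ DF.getD (3 : Int) 0 := by
              rw [hval (3 : Int) (by norm_num), hbc, if_pos b3]
              have := bCount_nonneg input (3 : Int) (PySem.List.pyRange ((input.length : Int) - 1 - 1) ((input.length : Int) - m) (-1))
              omega
            have hz : ∀ d ∈ ([1, 2, 3, 4, -1, -2, -3, -4] : List Int), d ≠ (3 : Int) → DF.getD d 0 = 0 := by
              intro d hd hne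
              have hbnd : -4 ≤ d ∧ d ≤ 4 := by fin_cases hd <;> norm_num
              have hww : ¬ (apWrapB (PySem.List.pyGetD input ((input.length : Int) - 1) 0 - d) = PySem.List.pyGetD input ((input.length : Int) - 1 - 1) 0) := by
                intro hw
                have h9 := apWrapB_inj (x := PySem.List.pyGetD input ((input.length : Int) - 1) 0 - d) (y := PySem.List.pyGetD input ((input.length : Int) - 1) 0 - (3 : Int)) (by omega) (by omega) (hw.trans b3.symm)
                omega
              rw [hval d hd, hbc, if_neg hww]
            rw [maxsel_pos _ (3 : Int) (by norm_num) hpos hz, Option.getD_some, hval (3 : Int) (by norm_num)]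
          · by_cases b4 : apWrapB (PySem.List.pyGetD input ((input.length : Int) - 1) 0 - (4 : Int)) = PySem.List.pyGetD input ((input.length : Int) - 1 - 1) 0
            · have hfind : (([1, 2, 3, 4, -1, -2, -3, -4] : List Int).find? (fun d => apWrapB (PySem.List.pyGetD input ((input.length : Int) - 1) 0 - d) == PySem.List.pyGetD input ((input.length : Int) - 1 - 1) 0)) = some (4 : Int) := by
                rw [List.find?_cons_of_neg (by simp only [beq_iff_eq]; exact b1)]
                rw [List.find?_cons_of_neg (by simp only [beq_iff_eq]; exact b2)]
                rw [List.find?_cons_of_neg (by simp only [beq_iff_eq]; exact b3)]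
                rw [List.find?_cons_of_pos (by simp only [beq_iff_eq]; exact b4)]
              rw [hfind]
              have hpos : 1 ≤ DF.getD (4 : Int) 0 := by
                rw [hval (4 : Int) (by norm_num), hbc, if_pos b4]
                have := bCount_nonneg input (4 : Int) (PySem.List.pyRange ((input.length : Int) - 1 - 1) ((input.length : Int) - m) (-1))
                omega
              have hz : ∀ d ∈ ([1, 2, 3, 4, -1, -2, -3, -4] : List Int), d ≠ (4 : Int) → DF.getD d 0 = 0 := by
                intro d hd hne
                have hbnd : -4 ≤ d ∧ d ≤ 4 := by fin_cases hd <;> norm_num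
                have hww : ¬ (apWrapB (PySem.List.pyGetD input ((input.length : Int) - 1) 0 - d) = PySem.List.pyGetD input ((input.length : Int) - 1 - 1) 0) := by
                  intro hw
                  have h9 := apWrapB_inj (x := PySem.List.pyGetD input ((input.length : Int) - 1) 0 - d) (y := PySem.List.pyGetD input ((input.length : Int) - 1) 0 - (4 : Int)) (by omega) (by omega) (hw.trans b4.symm)
                  omega
                rw [hval d hd, hbc, if_neg hww]
              rw [maxsel_pos _ (4 : Int) (by norm_num) hpos hz, Option.getD_some, hval (4 : Int) (by norm_num)]
            · by_cases b5 : apWrapB (PySem.List.pyGetD input ((input.length : Int) - 1) 0 - (-1 : Int)) = PySem.List.pyGetD input ((input.length : Int) - 1 - 1) 0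
              · have hfind : (([1, 2, 3, 4, -1, -2, -3, -4] : List Int).find? (fun d => apWrapB (PySem.List.pyGetD input ((input.length : Int) - 1) 0 - d) == PySem.List.pyGetD input ((input.length : Int) - 1 - 1) 0)) = some (-1 : Int) := by
                  rw [List.find?_cons_of_neg (by simp only [beq_iff_eq]; exact b1)]
                  rw [List.find?_cons_of_neg (by simp only [beq_iff_eq]; exact b2)]
                  rw [List.find?_cons_of_neg (by simp only [beq_iff_eq]; exact b3)]
                  rw [List.find?_cons_of_neg (by simp only [beq_iff_eq]; exact b4)]
                  rw [List.find?_cons_of_pos (by simp only [beq_iff_eq]; exact b5)]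
                rw [hfind]
                have hpos : 1 ≤ DF.getD (-1 : Int) 0 := by
                  rw [hval (-1 : Int) (by norm_num), hbc, if_pos b5]
                  have := bCount_nonneg input (-1 : Int) (PySem.List.pyRange ((input.length : Int) - 1 - 1) ((input.length : Int) - m) (-1))
                  omega
                have hz : ∀ d ∈ ([1, 2, 3, 4, -1, -2, -3, -4] : List Int), d ≠ (-1 : Int) → DF.getD d 0 = 0 := by
                  intro d hd hne
                  have hbnd : -4 ≤ d ∧ d ≤ 4 := by fin_cases hd <;> norm_num
                  have hww : ¬ (apWrapB (PySem.List.pyGetD input ((input.length : Int) - 1) 0 - d) = PySem.List.pyGetD input ((input.length : Int) - 1 - 1) 0) := by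
                    intro hw
                    have h9 := apWrapB_inj (x := PySem.List.pyGetD input ((input.length : Int) - 1) 0 - d) (y := PySem.List.pyGetD input ((input.length : Int) - 1) 0 - (-1 : Int)) (by omega) (by omega) (hw.trans b5.symm)
                    omega
                  rw [hval d hd, hbc, if_neg hww]
                rw [maxsel_pos _ (-1 : Int) (by norm_num) hpos hz, Option.getD_some, hval (-1 : Int) (by norm_num)]
              · by_cases b6 : apWrapB (PySem.List.pyGetD input ((input.length : Int) - 1) 0 - (-2 : Int)) = PySem.List.pyGetD input ((input.length : Int) - 1 - 1) 0
                · have hfind : (([1, 2, 3, 4, -1, -2, -3, -4] : List Int).find? (fun d => apWrapB (PySem.List.pyGetD input ((input.length : Int) - 1) 0 - d) == PySem.List.pyGetD input ((input.length : Int) - 1 - 1) 0)) = some (-2 : Int) := by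
                    rw [List.find?_cons_of_neg (by simp only [beq_iff_eq]; exact b1)]
                    rw [List.find?_cons_of_neg (by simp only [beq_iff_eq]; exact b2)]
                    rw [List.find?_cons_of_neg (by simp only [beq_iff_eq]; exact b3)]
                    rw [List.find?_cons_of_neg (by simp only [beq_iff_eq]; exact b4)]
                    rw [List.find?_cons_of_neg (by simp only [beq_iff_eq]; exact b5)]
                    rw [List.find?_cons_of_pos (by simp only [beq_iff_eq]; exact b6)]
                  rw [hfind]
                  have hpos : 1 ≤ DF.getD (-2 : Int) 0 := by
                    rw [hval (-2 : Int) (by norm_num), hbc, if_pos b6]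
                    have := bCount_nonneg input (-2 : Int) (PySem.List.pyRange ((input.length : Int) - 1 - 1) ((input.length : Int) - m) (-1))
                    omega
                  have hz : ∀ d ∈ ([1, 2, 3, 4, -1, -2, -3, -4] : List Int), d ≠ (-2 : Int) → DF.getD d 0 = 0 := by
                    intro d hd hne
                    have hbnd : -4 ≤ d ∧ d ≤ 4 := by fin_cases hd <;> norm_num
                    have hww : ¬ (apWrapB (PySem.List.pyGetD input ((input.length : Int) - 1) 0 - d) = PySem.List.pyGetD input ((input.length : Int) - 1 - 1) 0) := by
                      intro hw
                      have h9 := apWrapB_inj (x := PySem.List.pyGetD input ((input.length : Int) - 1) 0 - d) (y := PySem.List.pyGetD input ((input.length : Int) - 1) 0 - (-2 : Int)) (by omega) (by omega) (hw.trans b6.symm)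
                      omega
                    rw [hval d hd, hbc, if_neg hww]
                  rw [maxsel_pos _ (-2 : Int) (by norm_num) hpos hz, Option.getD_some, hval (-2 : Int) (by norm_num)]
                · by_cases b7 : apWrapB (PySem.List.pyGetD input ((input.length : Int) - 1) 0 - (-3 : Int)) = PySem.List.pyGetD input ((input.length : Int) - 1 - 1) 0
                  · have hfind : (([1, 2, 3, 4, -1, -2, -3, -4] : List Int).find? (fun d => apWrapB (PySem.List.pyGetD input ((input.length : Int) - 1) 0 - d) == PySem.List.pyGetD input ((input.length : Int) - 1 - 1) 0)) = some (-3 : Int) := by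
                      rw [List.find?_cons_of_neg (by simp only [beq_iff_eq]; exact b1)]
                      rw [List.find?_cons_of_neg (by simp only [beq_iff_eq]; exact b2)]
                      rw [List.find?_cons_of_neg (by simp only [beq_iff_eq]; exact b3)]
                      rw [List.find?_cons_of_neg (by simp only [beq_iff_eq]; exact b4)]
                      rw [List.find?_cons_of_neg (by simp only [beq_iff_eq]; exact b5)]
                      rw [List.find?_cons_of_neg (by simp only [beq_iff_eq]; exact b6)]
                      rw [List.find?_cons_of_pos (by simp only [beq_iff_eq]; exact b7)]
                    rw [hfind]
                    have hpos : 1 ≤ DF.getD (-3 : Int) 0 := by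
                      rw [hval (-3 : Int) (by norm_num), hbc, if_pos b7]
                      have := bCount_nonneg input (-3 : Int) (PySem.List.pyRange ((input.length : Int) - 1 - 1) ((input.length : Int) - m) (-1))
                      omega
                    have hz : ∀ d ∈ ([1, 2, 3, 4, -1, -2, -3, -4] : List Int), d ≠ (-3 : Int) → DF.getD d 0 = 0 := by
                      intro d hd hne
                      have hbnd : -4 ≤ d ∧ d ≤ 4 := by fin_cases hd <;> norm_num
                      have hww : ¬ (apWrapB (PySem.List.pyGetD input ((input.length : Int) - 1) 0 - d) = PySem.List.pyGetD input ((input.length : Int) - 1 - 1) 0) := by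
                        intro hw
                        have h9 := apWrapB_inj (x := PySem.List.pyGetD input ((input.length : Int) - 1) 0 - d) (y := PySem.List.pyGetD input ((input.length : Int) - 1) 0 - (-3 : Int)) (by omega) (by omega) (hw.trans b7.symm)
                        omega
                      rw [hval d hd, hbc, if_neg hww]
                    rw [maxsel_pos _ (-3 : Int) (by norm_num) hpos hz, Option.getD_some, hval (-3 : Int) (by norm_num)]
                  · by_cases b8 : apWrapB (PySem.List.pyGetD input ((input.length : Int) - 1) 0 - (-4 : Int)) = PySem.List.pyGetD input ((input.length : Int) - 1 - 1) 0
                    · have hfind : (([1, 2, 3, 4, -1, -2, -3, -4] : List Int).find? (fun d => apWrapB (PySem.List.pyGetD input ((input.length : Int) - 1) 0 - d) == PySem.List.pyGetD input ((input.length : Int) - 1 - 1) 0)) = some (-4 : Int) := by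
                        rw [List.find?_cons_of_neg (by simp only [beq_iff_eq]; exact b1)]
                        rw [List.find?_cons_of_neg (by simp only [beq_iff_eq]; exact b2)]
                        rw [List.find?_cons_of_neg (by simp only [beq_iff_eq]; exact b3)]
                        rw [List.find?_cons_of_neg (by simp only [beq_iff_eq]; exact b4)]
                        rw [List.find?_cons_of_neg (by simp only [beq_iff_eq]; exact b5)]
                        rw [List.find?_cons_of_neg (by simp only [beq_iff_eq]; exact b6)]
                        rw [List.find?_cons_of_neg (by simp only [beq_iff_eq]; exact b7)]
                        rw [List.find?_cons_of_pos (by simp only [beq_iff_eq]; exact b8)]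
                      rw [hfind]
                      have hpos : 1 ≤ DF.getD (-4 : Int) 0 := by
                        rw [hval (-4 : Int) (by norm_num), hbc, if_pos b8]
                        have := bCount_nonneg input (-4 : Int) (PySem.List.pyRange ((input.length : Int) - 1 - 1) ((input.length : Int) - m) (-1))
                        omega
                      have hz : ∀ d ∈ ([1, 2, 3, 4, -1, -2, -3, -4] : List Int), d ≠ (-4 : Int) → DF.getD d 0 = 0 := by
                        intro d hd hne
                        have hbnd : -4 ≤ d ∧ d ≤ 4 := by fin_cases hd <;> norm_num
                        have hww : ¬ (apWrapB (PySem.List.pyGetD input ((input.length : Int) - 1) 0 - d) = PySem.List.pyGetD input ((input.length : Int) - 1 - 1) 0) := by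
                          intro hw
                          have h9 := apWrapB_inj (x := PySem.List.pyGetD input ((input.length : Int) - 1) 0 - d) (y := PySem.List.pyGetD input ((input.length : Int) - 1) 0 - (-4 : Int)) (by omega) (by omega) (hw.trans b8.symm)
                          omega
                        rw [hval d hd, hbc, if_neg hww]
                      rw [maxsel_pos _ (-4 : Int) (by norm_num) hpos hz, Option.getD_some, hval (-4 : Int) (by norm_num)]
                    · have hfind : (([1, 2, 3, 4, -1, -2, -3, -4] : List Int).find? (fun d => apWrapB (PySem.List.pyGetD input ((input.length : Int) - 1) 0 - d) == PySem.List.pyGetD input ((input.length : Int) - 1 - 1) 0)) = none := by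
                        rw [List.find?_cons_of_neg (by simp only [beq_iff_eq]; exact b1)]
                        rw [List.find?_cons_of_neg (by simp only [beq_iff_eq]; exact b2)]
                        rw [List.find?_cons_of_neg (by simp only [beq_iff_eq]; exact b3)]
                        rw [List.find?_cons_of_neg (by simp only [beq_iff_eq]; exact b4)]
                        rw [List.find?_cons_of_neg (by simp only [beq_iff_eq]; exact b5)]
                        rw [List.find?_cons_of_neg (by simp only [beq_iff_eq]; exact b6)]
                        rw [List.find?_cons_of_neg (by simp only [beq_iff_eq]; exact b7)]
                        rw [List.find?_cons_of_neg (by simp only [beq_iff_eq]; exact b8)]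
                        rfl
                      rw [hfind]
                      have hz0 : ∀ d ∈ ([1, 2, 3, 4, -1, -2, -3, -4] : List Int), DF.getD d 0 = 0 := by
                        intro d hd
                        rw [hval d hd, hbc]
                        fin_cases hd <;> first | rw [if_neg b1] | rw [if_neg b2] | rw [if_neg b3] | rw [if_neg b4] | rw [if_neg b5] | rw [if_neg b6] | rw [if_neg b7] | rw [if_neg b8]
                      rw [maxsel_zero _ (hz0 (1 : Int) (by norm_num)) (hz0 (2 : Int) (by norm_num)) (hz0 (3 : Int) (by norm_num)) (hz0 (4 : Int) (by norm_num)) (hz0 (-1 : Int) (by norm_num)) (hz0 (-2 : Int) (by norm_num)) (hz0 (-3 : Int) (by norm_num)) (hz0 (-4 : Int) (by norm_num)), Option.getD_some, hz0 (1 : Int) (by norm_num)]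
  · simp only [aritmeticPredictor, aritmeticPredictor_alt]
    rw [if_neg hge, if_pos (Or.inl (by omega))]
    rfl
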